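-- pv_equiv track=rewrite | github.com/contactanuj/Reqruit | backend/src/services/streak_service.py | xp_to_next_league
-- ===== SOURCE A (Python) =====
-- LEAGUE_THRESHOLDS: list[tuple[str, int, int | None]] = [
--     ("bronze", 0, 99),
--     ("silver", 100, 249),
--     ("gold", 250, 499),
--     ("platinum", 500, 999),
--     ("diamond", 1000, None),
-- ]
--
-- def xp_to_next_league(weekly_xp: int) -> int | None:
--     """Return XP needed to reach next league, or None if already Diamond."""
--     for i, (name, low, high) in enumerate(LEAGUE_THRESHOLDS):
--         if high is None:
--             return None  # Diamond — no next league
--         if weekly_xp <= high: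
--             if i + 1 < len(LEAGUE_THRESHOLDS):
--                 return LEAGUE_THRESHOLDS[i + 1][1] - weekly_xp
--             return None
--     return None
-- ===== SOURCE B (Python) =====
-- _BOUNDARIES = [100, 250, 500, 1000]  # lower bounds of silver..diamond
--
--
-- def xp_to_next_league(weekly_xp: int) -> int | None:
--     """Return XP needed to reach next league, or None if already Diamond."""
--     # binary search (bisect_right) for the first boundary strictly above weekly_xp
--     lo, hi = 0, len(_BOUNDARIES)
--     while lo < hi:
--         mid = (lo + hi) // 2
--         if weekly_xp < _BOUNDARIES[mid]:
--             hi = mid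
--         else:
--             lo = mid + 1
--     if lo < len(_BOUNDARIES):
--         return _BOUNDARIES[lo] - weekly_xp
--     return None
-- ===== Notes on version B (the rewrite author's own statement) =====
-- stated objective: idiomatic
-- what changed: Replaced the linear enumerate-and-lookahead scan over the league threshold table with a bisect_right-style binary search over the derived list of next-tier lower bounds [100, 250, 500, 1000].
import Mathlib
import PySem

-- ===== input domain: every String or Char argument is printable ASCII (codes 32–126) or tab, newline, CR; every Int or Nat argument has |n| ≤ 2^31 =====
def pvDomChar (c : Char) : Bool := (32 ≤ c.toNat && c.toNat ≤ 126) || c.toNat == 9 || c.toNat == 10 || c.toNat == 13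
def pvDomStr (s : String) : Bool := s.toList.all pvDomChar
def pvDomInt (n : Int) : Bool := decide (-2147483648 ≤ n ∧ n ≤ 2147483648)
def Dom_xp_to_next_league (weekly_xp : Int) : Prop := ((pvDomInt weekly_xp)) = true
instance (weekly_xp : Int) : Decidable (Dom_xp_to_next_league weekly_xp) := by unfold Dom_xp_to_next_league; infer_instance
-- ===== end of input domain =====

-- B replaces A's linear enumerate-and-lookahead scan with a binary search over the
-- next-tier lower bounds (idiomatic bisect_right); return values agree everywhere.

-- ===== PORT A =====
def LEAGUE_THRESHOLDS : List (String × Int × Option Int) :=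
  [("bronze", 0, some 99), ("silver", 100, some 249), ("gold", 250, some 499),
   ("platinum", 500, some 999), ("diamond", 1000, none)]

-- the 'for i, (name, low, high) in enumerate(...)' loop, one entry at a time
def xpLoopA (weekly_xp : Int) : List (Int × String × Int × Option Int) → Option Int
  | [] => none
  | (i, _, _, high) :: rest =>
    match high with
    | none => none
    | some h =>
      if weekly_xp ≤ h then
        if i + 1 < (LEAGUE_THRESHOLDS.length : Int) then
          some ((PySem.List.pyGetD LEAGUE_THRESHOLDS (i + 1) ("", 0, none)).2.1 - weekly_xp)
        else none
      else xpLoopA weekly_xp rest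

def xp_to_next_league (weekly_xp : Int) : Option Int :=
  xpLoopA weekly_xp (PySem.List.enumerate LEAGUE_THRESHOLDS)

-- ===== PORT B =====
def pvBoundaries : List Int := [100, 250, 500, 1000]

-- the hand-written bisect_right while-loop of Source B
def bsLoop (weekly_xp : Int) (lo hi : Nat) : Nat :=
  if lo < hi then
    let mid := (lo + hi) / 2
    if weekly_xp < pvBoundaries.getD mid 0 then bsLoop weekly_xp lo mid
    else bsLoop weekly_xp (mid + 1) hi
  else lo
termination_by hi - lo

def xp_to_next_league_alt (weekly_xp : Int) : Option Int :=
  let lo := bsLoop weekly_xp 0 pvBoundaries.length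
  if lo < pvBoundaries.length then some (pvBoundaries.getD lo 0 - weekly_xp)
  else none

-- ===== PRECONDITION & SPEC =====
def Spec_xp_to_next_league (weekly_xp : Int) (out : Option Int) : Prop := out = xp_to_next_league_alt weekly_xp
instance (weekly_xp : Int) (out : Option Int) : Decidable (Spec_xp_to_next_league weekly_xp out) := by unfold Spec_xp_to_next_league; infer_instance

-- ===== CLAIM (what is proved, stated in full; the proofs are below) =====
def Claim_equal_xp_to_next_league : Prop := ∀ (weekly_xp : Int), Dom_xp_to_next_league weekly_xp → Spec_xp_to_next_league weekly_xp (xp_to_next_league weekly_xp)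

-- ===== LEMMAS AND PROOFS =====

-- ===== VERDICT (by name: the statement is the Claim_ definition above) =====
theorem xp_to_next_league_spec : Claim_equal_xp_to_next_league := by
  intro x _
  unfold Spec_xp_to_next_league xp_to_next_league xp_to_next_league_alt
  rcases lt_or_ge x 100 with h1 | h1
  · simp [bsLoop, xpLoopA, LEAGUE_THRESHOLDS, pvBoundaries, PySem.List.enumerate,
      PySem.List.pyGetD, show x ≤ 99 by omega, show x < 500 by omega,
      show x < 250 by omega, h1]
  rcases lt_or_ge x 250 with h2 | h2
  · simp [bsLoop, xpLoopA, LEAGUE_THRESHOLDS, pvBoundaries, PySem.List.enumerate,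
      PySem.List.pyGetD, show ¬ x ≤ 99 by omega, show x ≤ 249 by omega,
      show x < 500 by omega, show ¬ x < 100 by omega, h2]
  rcases lt_or_ge x 500 with h3 | h3
  · simp [bsLoop, xpLoopA, LEAGUE_THRESHOLDS, pvBoundaries, PySem.List.enumerate,
      PySem.List.pyGetD, show ¬ x ≤ 99 by omega, show ¬ x ≤ 249 by omega,
      show x ≤ 499 by omega, show ¬ x < 250 by omega, h3]
  rcases lt_or_ge x 1000 with h4 | h4
  · simp [bsLoop, xpLoopA, LEAGUE_THRESHOLDS, pvBoundaries, PySem.List.enumerate,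
      PySem.List.pyGetD, show ¬ x ≤ 99 by omega, show ¬ x ≤ 249 by omega,
      show ¬ x ≤ 499 by omega, show x ≤ 999 by omega, show ¬ x < 500 by omega, h4]
  · simp [bsLoop, xpLoopA, LEAGUE_THRESHOLDS, pvBoundaries, PySem.List.enumerate,
      show ¬ x ≤ 99 by omega, show ¬ x ≤ 249 by omega,
      show ¬ x ≤ 499 by omega, show ¬ x ≤ 999 by omega,
      show ¬ x < 500 by omega, show ¬ x < 1000 by omega]
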